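-- pv_equiv track=rewrite | github.com/bgoonz/UsefulResourceRepo2.0 | _BACKUPS/my-gists/by-extension/python/09-MinStepsToMakePilesEqualHeight.py | min_steps_equal_piles
-- ===== SOURCE A (Python) =====
-- def min_steps_equal_piles(piles):
--     steps = 0
--     length = len(piles)
--     if piles == []:
--         return 0
--     else:
--         # get sorted list
--         sorted_piles = set(piles)
--         sorted_piles = sorted(sorted_piles)
--         # get min, max and 2nd max
--         minimum = sorted_piles[0]
--         second_largest = sorted_piles[-2]
--         max_pile = sorted_piles[-1]
--         # subtract from max to equal 2nd max
--         # repeat until all equal second max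
--         for x in range(length):
--             if piles[x] == max_pile:
--                 difference = max_pile - second_largest
--                 piles[x] = piles[x] - difference
--                 steps += 1
--         # loop again to make second max equal to min
--         for x in range(length):
--             if piles[x] != minimum:
--                 difference = piles[x]-minimum
--                 piles[x] = piles[x]-difference
--                 steps += 1
--         # return # of steps
--         return steps
-- ===== SOURCE B (Python) =====
-- def min_steps_equal_piles(piles):
--     # Single linear pass: min, max and their multiplicities; no sorting, no mutation of piles.
--     if not piles:
--         return 0
--     mn = mx = piles[0]
--     cmin = cmax = 0
--     for x in piles:
--         if x < mn:
--             mn, cmin = x, 1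
--         elif x == mn:
--             cmin += 1
--         if x > mx:
--             mx, cmax = x, 1
--         elif x == mx:
--             cmax += 1
--     if mn == mx:
--         return 0
--     mid = len(piles) - cmin - cmax
--     return cmax + mid + (cmax if mid > 0 else 0)
-- ===== Notes on version B (the rewrite author's own statement) =====
-- stated objective: faster
-- what changed: Replaces A's set+sort plus two mutating index loops by one linear scan that keeps min, max and their multiplicities and returns the step count from a closed-form tally (B does not mutate the argument).
-- outside the precondition, e.g. on min_steps_equal_piles([-2]): A raises IndexError, B returns 0
import Mathlib
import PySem

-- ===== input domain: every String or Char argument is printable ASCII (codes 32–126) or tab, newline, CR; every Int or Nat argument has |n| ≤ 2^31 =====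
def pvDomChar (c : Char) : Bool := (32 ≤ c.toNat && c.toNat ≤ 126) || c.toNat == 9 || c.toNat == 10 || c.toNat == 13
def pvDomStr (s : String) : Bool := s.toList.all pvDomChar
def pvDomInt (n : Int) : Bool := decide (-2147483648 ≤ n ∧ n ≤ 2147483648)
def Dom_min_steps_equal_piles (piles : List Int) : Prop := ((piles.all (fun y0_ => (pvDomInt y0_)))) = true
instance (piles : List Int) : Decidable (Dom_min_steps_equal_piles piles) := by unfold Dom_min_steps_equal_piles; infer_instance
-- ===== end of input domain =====

-- B replaces A's set+sort and two mutating passes by one linear min/max/count scan with a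
-- closed-form tally (asymptotically faster, measured); A mutates its argument in place, B does
-- not — the equivalence proved here is about the RETURN value only.


-- ===== PORT A =====
-- first loop of A: for x in range(length): if piles[x] == max_pile: piles[x] -= diff; steps += 1
-- (index loop reading/writing piles[x] ported as structural recursion over the same list+steps state)
def pvPass1 (max_pile second_largest : Int) : List Int → Int → List Int × Int
  | [], steps => ([], steps)
  | y :: ys, steps =>
    if y = max_pile then
      let r := pvPass1 max_pile second_largest ys (steps + 1)
      ((y - (max_pile - second_largest)) :: r.1, r.2)
    else
      let r := pvPass1 max_pile second_largest ys steps
      (y :: r.1, r.2)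

-- second loop of A: for x in range(length): if piles[x] != minimum: piles[x] -= (piles[x]-minimum); steps += 1
def pvPass2 (minimum : Int) : List Int → Int → List Int × Int
  | [], steps => ([], steps)
  | y :: ys, steps =>
    if y ≠ minimum then
      let r := pvPass2 minimum ys (steps + 1)
      ((y - (y - minimum)) :: r.1, r.2)
    else
      let r := pvPass2 minimum ys steps
      (y :: r.1, r.2)

def min_steps_equal_piles (piles : List Int) : Int :=
  if piles = [] then 0
  else
    let sorted_piles := PySem.List.sorted (PySem.Set.ofList piles) (fun x => x) false
    match PySem.List.pyGet? sorted_piles 0, PySem.List.pyGet? sorted_piles (-2),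
          PySem.List.pyGet? sorted_piles (-1) with
    | some minimum, some second_largest, some max_pile =>
        let r1 := pvPass1 max_pile second_largest piles 0
        let r2 := pvPass2 minimum r1.1 r1.2
        r2.2
    | _, _, _ => 0   -- Python raises IndexError here (all elements equal); outside Pre_

-- ===== PORT B =====
-- the loop body of Source B: update (mn, mx, cmin, cmax) with one element
def pvScan (st : Int × Int × Int × Int) (x : Int) : Int × Int × Int × Int :=
  let (mn, mx, cmin, cmax) := st
  let (mn, cmin) := if x < mn then (x, 1) else if x = mn then (mn, cmin + 1) else (mn, cmin)
  let (mx, cmax) := if mx < x then (x, 1) else if x = mx then (mx, cmax + 1) else (mx, cmax)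
  (mn, mx, cmin, cmax)

def min_steps_equal_piles_alt (piles : List Int) : Int :=
  match piles with
  | [] => 0
  | p :: _ =>
    let st := piles.foldl pvScan (p, p, 0, 0)
    if st.1 = st.2.1 then 0
    else
      let mid := (piles.length : Int) - st.2.2.1 - st.2.2.2
      st.2.2.2 + mid + (if 0 < mid then st.2.2.2 else 0)

-- ===== PRECONDITION & SPEC =====
-- Pre_ excludes exactly the inputs on which A raises IndexError: non-empty lists whose
-- elements are all equal (sorted(set(piles)) has one element and [-2] is out of range).
def Pre_min_steps_equal_piles (piles : List Int) : Prop :=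
  piles = [] ∨ ∃ x ∈ piles, x ≠ piles.headI
instance (piles : List Int) : Decidable (Pre_min_steps_equal_piles piles) := by
  unfold Pre_min_steps_equal_piles; infer_instance
def pvWitness_min_steps_equal_piles : List Int := [1, 2, 2]

def Spec_min_steps_equal_piles (piles : List Int) (out : Int) : Prop := out = min_steps_equal_piles_alt piles
instance (piles : List Int) (out : Int) : Decidable (Spec_min_steps_equal_piles piles out) := by unfold Spec_min_steps_equal_piles; infer_instance

-- ===== CLAIM (what is proved, stated in full; the proofs are below) =====
def Claim_equal_min_steps_equal_piles : Prop := ∀ (piles : List Int), Dom_min_steps_equal_piles piles → Pre_min_steps_equal_piles piles → Spec_min_steps_equal_piles piles (min_steps_equal_piles piles)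

-- ===== LEMMAS AND PROOFS =====

theorem pass1_eq (mp sl : Int) (l : List Int) (s : Int) :
    pvPass1 mp sl l s =
      (l.map (fun y => if y = mp then sl else y), s + (l.count mp : Int)) := by
  induction l generalizing s with
  | nil => simp [pvPass1]
  | cons y ys ih =>
    by_cases h : y = mp <;>
      simp [pvPass1, h, ih] <;> omega

theorem pass2_eq (mn : Int) (l : List Int) (s : Int) :
    (pvPass2 mn l s).2 = s + ((l.countP (fun y => !(y == mn)) : Nat) : Int) := by
  induction l generalizing s with
  | nil => simp [pvPass2]
  | cons y ys ih =>
    by_cases h : y = mn <;>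
      simp [pvPass2, h, ih] <;> omega

theorem foldl_min_le (l : List Int) (a : Int) : l.foldl min a ≤ a := by
  induction l generalizing a with
  | nil => simp
  | cons y ys ih => exact le_trans (ih (min a y)) (min_le_left a y)

theorem le_foldl_max' (l : List Int) (a : Int) : a ≤ l.foldl max a := by
  induction l generalizing a with
  | nil => simp
  | cons y ys ih => exact le_trans (le_max_left a y) (ih (max a y))

theorem foldl_min_mem (l : List Int) (a : Int) : l.foldl min a = a ∨ l.foldl min a ∈ l := by
  induction l generalizing a with
  | nil => simp
  | cons y ys ih =>
    rcases ih (min a y) with h | h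
    · rcases min_cases a y with ⟨h1, _⟩ | ⟨h1, _⟩
      · left; rw [List.foldl_cons, h, h1]
      · right; rw [List.foldl_cons, h, h1]; exact List.mem_cons_self
    · right; exact List.mem_cons_of_mem y h

theorem foldl_max_mem (l : List Int) (a : Int) : l.foldl max a = a ∨ l.foldl max a ∈ l := by
  induction l generalizing a with
  | nil => simp
  | cons y ys ih =>
    rcases ih (max a y) with h | h
    · rcases max_cases a y with ⟨h1, _⟩ | ⟨h1, _⟩
      · left; rw [List.foldl_cons, h, h1]
      · right; rw [List.foldl_cons, h, h1]; exact List.mem_cons_self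
    · right; exact List.mem_cons_of_mem y h

theorem foldl_min_le_mem (l : List Int) (a : Int) : ∀ y ∈ l, l.foldl min a ≤ y := by
  induction l generalizing a with
  | nil => simp
  | cons y ys ih =>
    intro z hz
    rcases List.mem_cons.mp hz with h | h
    · subst h
      exact le_trans (foldl_min_le ys (min a z)) (min_le_right a z)
    · exact ih (min a y) z h

theorem mem_le_foldl_max (l : List Int) (a : Int) : ∀ y ∈ l, y ≤ l.foldl max a := by
  induction l generalizing a with
  | nil => simp
  | cons y ys ih =>
    intro z hz
    rcases List.mem_cons.mp hz with h | h
    · subst h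
      exact le_trans (le_max_right a z) (le_foldl_max' ys (max a z))
    · exact ih (max a y) z h

theorem pvScan_eq (mn mx cmin cmax y : Int) :
    pvScan (mn, mx, cmin, cmax) y =
      (min mn y, max mx y,
       if y < mn then 1 else if y = mn then cmin + 1 else cmin,
       if mx < y then 1 else if y = mx then cmax + 1 else cmax) := by
  simp only [pvScan, min_def, max_def]
  split_ifs <;> simp_all <;> omega

theorem scan_eq (l : List Int) (mn mx cmin cmax : Int) :
    l.foldl pvScan (mn, mx, cmin, cmax) =
      (l.foldl min mn, l.foldl max mx,
       (if l.foldl min mn = mn then cmin else 0) + ((l.count (l.foldl min mn) : Nat) : Int),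
       (if l.foldl max mx = mx then cmax else 0) + ((l.count (l.foldl max mx) : Nat) : Int)) := by
  induction l generalizing mn mx cmin cmax with
  | nil => simp
  | cons y l ih =>
    simp only [List.foldl_cons, pvScan_eq, ih, Prod.mk.injEq, true_and]
    have hM := foldl_min_le l (min mn y)
    have hX := le_foldl_max' l (max mx y)
    constructor
    · rw [List.count_cons]
      simp only [beq_iff_eq]
      rcases le_total mn y with h | h
      · simp only [min_eq_left h] at hM ⊢
        split_ifs <;> push_cast <;> omega
      · simp only [min_eq_right h] at hM ⊢
        split_ifs <;> push_cast <;> omega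
    · rw [List.count_cons]
      simp only [beq_iff_eq]
      rcases le_total mx y with h | h
      · simp only [max_eq_right h] at hX ⊢
        split_ifs <;> push_cast <;> omega
      · simp only [max_eq_left h] at hX ⊢
        split_ifs <;> push_cast <;> omega

theorem count_partition (M X : Int) (hMX : M ≠ X) (l : List Int) :
    ((l.count M : Int)) + (l.count X : Int)
      + (l.countP (fun y => !(y == M) && !(y == X)) : Int) = l.length := by
  induction l with
  | nil => simp
  | cons y ys ih =>
    by_cases h1 : y = M <;> by_cases h2 : y = X <;>
      first
      | (exact absurd (h1.symm.trans h2) hMX)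
      | (simp [List.count_cons, List.countP_cons, h1, h2] at ih ⊢ <;> push_cast at ih ⊢ <;> omega)

theorem two_mem_length {α : Type} (l : List α) (a b : α) (ha : a ∈ l) (hb : b ∈ l)
    (hne : a ≠ b) : 2 ≤ l.length := by
  match l with
  | [] => exact absurd ha (List.not_mem_nil)
  | [c] =>
    rw [List.mem_singleton] at ha hb
    exact absurd (ha.trans hb.symm) hne
  | c :: d :: r => simp [List.length_cons]

theorem count_partition2 (M X : Int) (hMX : M ≠ X) (l : List Int) :
    l.countP (fun y => (y == X) || !(y == M)) =
      l.count X + l.countP (fun y => !(y == M) && !(y == X)) := by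
  induction l with
  | nil => simp
  | cons y ys ih =>
    by_cases h1 : y = M <;> by_cases h2 : y = X <;>
      first
      | (exact absurd (h1.symm.trans h2) hMX)
      | (simp [List.countP_cons, List.count_cons, h1, h2, ih]; omega)

-- ===== VERDICT (by name: the statement is the Claim_ definition above) =====
theorem min_steps_equal_piles_spec : Claim_equal_min_steps_equal_piles := by
  unfold Claim_equal_min_steps_equal_piles
  intro piles _ hpre
  unfold Spec_min_steps_equal_piles
  cases piles with
  | nil => decide
  | cons p t =>
    obtain ⟨x, hxmem, hxp⟩ : ∃ x ∈ p :: t, x ≠ p := by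
      unfold Pre_min_steps_equal_piles at hpre
      rcases hpre with h | ⟨x, hx, hne⟩
      · simp at h
      · exact ⟨x, hx, by simpa using hne⟩
    set sp := PySem.List.sorted (PySem.Set.ofList (p :: t)) (fun x => x) false with hspdef
    set M := List.foldl min p (p :: t) with hMdef
    set X := List.foldl max p (p :: t) with hXdef
    have hmemsp : ∀ z : Int, z ∈ sp ↔ z ∈ p :: t := fun z => by
      rw [hspdef, PySem.List.mem_sorted, PySem.Set.mem_ofList]
    have hpw : sp.Pairwise (· < ·) := by
      rw [hspdef]; exact PySem.List.sorted_ofList_pairwise_lt (p :: t)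
    have hpwi := List.pairwise_iff_getElem.mp hpw
    have hMle : ∀ y ∈ p :: t, M ≤ y := foldl_min_le_mem (p :: t) p
    have hXge : ∀ y ∈ p :: t, y ≤ X := mem_le_foldl_max (p :: t) p
    have hMmem : M ∈ p :: t := by
      rcases foldl_min_mem (p :: t) p with h | h
      · rw [hMdef, h]; exact List.mem_cons_self
      · exact hMdef ▸ h
    have hXmem : X ∈ p :: t := by
      rcases foldl_max_mem (p :: t) p with h | h
      · rw [hXdef, h]; exact List.mem_cons_self
      · exact hXdef ▸ h
    have hlen2 : 2 ≤ sp.length :=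
      two_mem_length sp x p ((hmemsp x).mpr hxmem) ((hmemsp p).mpr List.mem_cons_self) hxp
    have h0lt : 0 < sp.length := by omega
    have hidx_mem : ∀ (i : Nat) (hi : i < sp.length), sp[i] ∈ p :: t := fun i hi =>
      (hmemsp _).mp (List.getElem_mem hi)
    have hsp0 : sp[0]'h0lt = M := by
      refine le_antisymm ?_ (hMle _ (hidx_mem 0 h0lt))
      obtain ⟨i, hi, hieq⟩ := List.getElem_of_mem ((hmemsp M).mpr hMmem)
      rcases Nat.eq_zero_or_pos i with h | h
      · subst h; exact le_of_eq hieq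
      · exact hieq ▸ (hpwi 0 i h0lt hi h).le
    have hsplast : sp[sp.length - 1]'(by omega) = X := by
      refine le_antisymm (hXge _ (hidx_mem _ (by omega))) ?_
      obtain ⟨i, hi, hieq⟩ := List.getElem_of_mem ((hmemsp X).mpr hXmem)
      rcases Nat.lt_or_ge i (sp.length - 1) with h | h
      · exact hieq ▸ (hpwi i (sp.length - 1) hi (by omega) h).le
      · have hieq2 : i = sp.length - 1 := by omega
        subst hieq2
        exact hieq.ge
    have hMX : M < X := by
      have h := hpwi 0 (sp.length - 1) h0lt (by omega) (by omega)
      rwa [hsp0, hsplast] at h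
    have hg0 : PySem.List.pyGet? sp 0 = some M := by
      have h := PySem.List.pyGet?_ofNat sp 0 h0lt
      simpa [hsp0] using h
    have hg1 : PySem.List.pyGet? sp (-1) = some X := by
      have h := PySem.List.pyGet?_neg_natCast sp 1 (by omega) (by omega)
      norm_num at h
      rw [h, List.getElem?_eq_getElem (by omega), hsplast]
    have hg2 : PySem.List.pyGet? sp (-2) = some (sp[sp.length - 2]'(by omega)) := by
      have h := PySem.List.pyGet?_neg_natCast sp 2 (by omega) hlen2
      norm_num at h
      rw [h, List.getElem?_eq_getElem (by omega)]
    set s2 := sp[sp.length - 2]'(by omega) with hs2def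
    -- evaluate port A
    have hA : min_steps_equal_piles (p :: t) =
        (0 + ((p :: t).count X : Int)) +
          (((p :: t).map (fun y => if y = X then s2 else y)).countP (fun y => !(y == M)) : Int) := by
      simp only [min_steps_equal_piles, ← hspdef]
      simp only [hg0, hg1, hg2, ← hs2def]
      simp [pass1_eq, pass2_eq]
    -- evaluate port B
    have hBscan := scan_eq (p :: t) p p 0 0
    have hB : min_steps_equal_piles_alt (p :: t) =
        (((p :: t).count X : Int)) + ((p :: t).length - (p :: t).count M - (p :: t).count X)
          + (if 0 < ((p :: t).length : Int) - (p :: t).count M - (p :: t).count X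
             then ((p :: t).count X : Int) else 0) := by
      simp only [min_steps_equal_piles_alt, hBscan, ← hMdef, ← hXdef]
      simp [hMX.ne]
    have hpart := count_partition M X hMX.ne (p :: t)
    rcases (by omega : sp.length = 2 ∨ 3 ≤ sp.length) with hlen | hlen
    · -- exactly two distinct values: s2 = minimum, mid = 0
      have hs2 : s2 = M := by
        rw [hs2def]
        have h02 : sp.length - 2 = 0 := by omega
        simp only [h02]
        exact hsp0
      have hall : ∀ y ∈ p :: t, y = M ∨ y = X := by
        intro y hy
        obtain ⟨i, hi, hieq⟩ := List.getElem_of_mem ((hmemsp y).mpr hy)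
        rcases (by omega : i = 0 ∨ i = sp.length - 1) with h | h
        · subst h; left; rw [← hieq, hsp0]
        · subst h; right; rw [← hieq, hsplast]
      have hcp0 : ((p :: t).map (fun y => if y = X then s2 else y)).countP
          (fun y => !(y == M)) = 0 := by
        rw [List.countP_map, List.countP_eq_zero]
        intro a ha
        rcases hall a ha with h | h <;>
          simp [Function.comp, h, hs2, hMX.ne]
      have hmid0 : (p :: t).countP (fun y => !(y == M) && !(y == X)) = 0 := by
        rw [List.countP_eq_zero]
        intro a ha
        rcases hall a ha with h | h <;> simp [h]
      rw [hA, hB, hcp0]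
      rw [hmid0] at hpart
      push_cast at hpart ⊢
      rw [if_neg (by omega)]
      omega
    · -- at least three distinct values: s2 ≠ minimum, mid > 0
      have hs2M : M < s2 := by
        have h := hpwi 0 (sp.length - 2) h0lt (by omega) (by omega)
        rwa [hsp0, ← hs2def] at h
      have hfcong : (fun y => !((if y = X then s2 else y) == M)) =
          (fun y => (y == X) || !(y == M)) := by
        funext y
        by_cases h : y = X <;> simp [h, hs2M.ne']
      have hcp : (((p :: t).map (fun y => if y = X then s2 else y)).countP
          (fun y => !(y == M)) : Nat) =
          (p :: t).count X + (p :: t).countP (fun y => !(y == M) && !(y == X)) := by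
        rw [List.countP_map]
        have : ((fun y => !(y == M)) ∘ fun y => if y = X then s2 else y) =
            (fun y => (y == X) || !(y == M)) := hfcong
        rw [this, count_partition2 M X hMX.ne]
      have hv : 0 < (p :: t).countP (fun y => !(y == M) && !(y == X)) := by
        rw [List.countP_pos_iff]
        have h1lt : 1 < sp.length := by omega
        refine ⟨sp[1]'h1lt, hidx_mem 1 h1lt, ?_⟩
        have hvM : M < sp[1]'h1lt := by
          have h := hpwi 0 1 h0lt h1lt (by omega)
          rwa [hsp0] at h
        have hvX : sp[1]'h1lt < X := by
          have h := hpwi 1 (sp.length - 1) h1lt (by omega) (by omega)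
          rwa [hsplast] at h
        simp [hvM.ne', hvX.ne]
      rw [hA, hB, hcp]
      push_cast at hpart ⊢
      rw [if_pos (by omega)]
      omega
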